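-- pv_equiv track=rewrite | github.com/kbvanzomeren/AoC | 2022/day_17.py | print_map
-- ===== SOURCE A (Python) =====
-- def print_map(filled, start_y, pattern_size):
--     stringy = ''
--     for y in range(start_y - 1, start_y - pattern_size, -1):
--         row = ''
--         for x in range(7):
--             row += '#' if (x, y) in filled else ' '
--         stringy += row
--     return stringy
-- ===== SOURCE B (Python) =====
-- def print_map(filled, start_y, pattern_size):
--     grid = [[' '] * 7 for _ in range(pattern_size - 1)]
--     for (x, y) in filled:
--         if 0 <= x < 7 and start_y - pattern_size < y <= start_y - 1:
--             grid[start_y - 1 - y][x] = '#'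
--     return ''.join(''.join(row) for row in grid)
-- ===== Notes on version B (the rewrite author's own statement) =====
-- stated objective: faster
-- what changed: Instead of scanning every cell of the window and testing list membership per cell (O(rows*7*|filled|)), B allocates the blank grid once, iterates only over the sparse filled points writing '#' into the right cell, and joins the rows.
import Mathlib
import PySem

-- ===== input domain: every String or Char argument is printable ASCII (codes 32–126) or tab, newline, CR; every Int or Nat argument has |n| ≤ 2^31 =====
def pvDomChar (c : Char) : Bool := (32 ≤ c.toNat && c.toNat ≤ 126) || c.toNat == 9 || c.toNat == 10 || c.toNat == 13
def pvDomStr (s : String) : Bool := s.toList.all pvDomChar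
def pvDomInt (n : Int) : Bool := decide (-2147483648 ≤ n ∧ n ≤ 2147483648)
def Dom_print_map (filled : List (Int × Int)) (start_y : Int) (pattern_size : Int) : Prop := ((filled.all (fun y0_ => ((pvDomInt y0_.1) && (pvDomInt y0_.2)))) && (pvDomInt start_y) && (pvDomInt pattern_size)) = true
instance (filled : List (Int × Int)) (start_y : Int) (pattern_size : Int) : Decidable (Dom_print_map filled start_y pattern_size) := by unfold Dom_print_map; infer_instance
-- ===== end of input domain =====

-- B fills a pre-allocated blank grid by iterating over the sparse filled points
-- instead of testing membership for every cell of the window (objective: faster).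


-- ===== PORT A =====
-- literal transliteration of A (strings carried as List Char, wrapped by String.mk at return)
def print_map (filled : List (Int × Int)) (start_y : Int) (pattern_size : Int) : String :=
  String.mk <|
    (PySem.List.pyRange (start_y - 1) (start_y - pattern_size) (-1)).foldl
      (fun stringy y =>
        stringy ++
          (PySem.List.pyRange 0 7 1).foldl
            (fun row x => row ++ (if (x, y) ∈ filled then ['#'] else [' '])) [])
      []

-- ===== PORT B =====
-- literal transliteration of Source B: blank grid, write '#' at each in-window point, join
def print_map_alt (filled : List (Int × Int)) (start_y : Int) (pattern_size : Int) : String :=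
  String.mk
    (filled.foldl
      (fun g p =>
        if 0 ≤ p.1 ∧ p.1 < 7 ∧ start_y - pattern_size < p.2 ∧ p.2 ≤ start_y - 1 then
          g.modify (start_y - 1 - p.2).toNat (fun r => r.set p.1.toNat '#')
        else g)
      (List.replicate (pattern_size - 1).toNat (List.replicate 7 ' '))).flatten

-- ===== PRECONDITION & SPEC =====
def Spec_print_map (filled : List (Int × Int)) (start_y : Int) (pattern_size : Int) (out : String) : Prop := out = print_map_alt filled start_y pattern_size
instance (filled : List (Int × Int)) (start_y : Int) (pattern_size : Int) (out : String) : Decidable (Spec_print_map filled start_y pattern_size out) := by unfold Spec_print_map; infer_instance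

-- ===== CLAIM (what is proved, stated in full; the proofs are below) =====
def Claim_equal_print_map : Prop := ∀ (filled : List (Int × Int)) (start_y : Int) (pattern_size : Int), Dom_print_map filled start_y pattern_size → Spec_print_map filled start_y pattern_size (print_map filled start_y pattern_size)

-- ===== LEMMAS AND PROOFS =====

-- the row of the window for row index i, as determined by membership in l
def pvRow (l : List (Int × Int)) (start_y : Int) (i : Nat) : List Char :=
  (PySem.List.pyRange 0 7 1).map
    (fun x => if (x, start_y - 1 - (i : Int)) ∈ l then '#' else ' ')

-- the whole window grid determined by membership in l
def pvGridOf (l : List (Int × Int)) (start_y : Int) (pattern_size : Int) : List (List Char) :=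
  (List.range (pattern_size - 1).toNat).map (pvRow l start_y)

lemma pvGridOf_nil (start_y pattern_size : Int) :
    pvGridOf [] start_y pattern_size
      = List.replicate (pattern_size - 1).toNat (List.replicate 7 ' ') := by
  unfold pvGridOf
  rw [List.eq_replicate_iff]
  refine ⟨by simp, ?_⟩
  intro b hb
  simp only [List.mem_map] at hb
  obtain ⟨i, _, rfl⟩ := hb
  simp [pvRow]

lemma pvFlatMap_singleton_map {α β : Type} (f : α → β) (l : List α) :
    l.flatMap (fun x => [f x]) = l.map f := by
  induction l with
  | nil => rfl
  | cons a t ih => simp [ih]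

lemma pvRow_append (l : List (Int × Int)) (p : Int × Int) (start_y : Int) (i : Nat)
    (hne : ∀ x : Int, 0 ≤ x → x < 7 → p ≠ (x, start_y - 1 - (i : Int))) :
    pvRow (l ++ [p]) start_y i = pvRow l start_y i := by
  unfold pvRow
  apply List.map_congr_left
  intro x hx
  have hx' : 0 ≤ x ∧ x < 7 := by
    simpa using (PySem.List.mem_pyRange_one.mp hx)
  have : ((x, start_y - 1 - (i : Int)) ∈ l ++ [p]) ↔ ((x, start_y - 1 - (i : Int)) ∈ l) := by
    simp only [List.mem_append, List.mem_singleton]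
    constructor
    · rintro (h | h)
      · exact h
      · exact absurd h.symm (hne x hx'.1 hx'.2)
    · exact Or.inl
  simp [this]

lemma pvRow_append_set (l : List (Int × Int)) (x y : Int) (start_y : Int) (i : Nat)
    (hx0 : 0 ≤ x) (hx7 : x < 7) (hy : y = start_y - 1 - (i : Int)) :
    pvRow (l ++ [(x, y)]) start_y i = (pvRow l start_y i).set x.toNat '#' := by
  unfold pvRow
  apply List.ext_getElem
  · simp [PySem.List.length_pyRange_one]
  intro k h1 h2
  have hk : k < 7 := by
    have := h1; simpa [PySem.List.length_pyRange_one] using this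
  rw [List.getElem_set]
  rw [List.getElem_map, List.getElem_map]
  rw [PySem.List.getElem_pyRange_one]
  subst hy
  by_cases hkx : x.toNat = k
  · have hxk : x = (k : Int) := by omega
    simp [hxk]
  · have hxk : (0 : Int) + (k : Int) ≠ x := by omega
    simp only [if_neg hkx, zero_add]
    have : ((k : Int), start_y - 1 - (i : Int)) ∈ l ++ [(x, start_y - 1 - (i : Int))]
        ↔ ((k : Int), start_y - 1 - (i : Int)) ∈ l := by
      simp only [List.mem_append, List.mem_singleton, Prod.mk.injEq]
      constructor
      · rintro (h | ⟨h, -⟩)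
        · exact h
        · omega
      · exact Or.inl
    simp [this]

-- one step of B's fold updates the membership grid by one point
lemma pvStep (l : List (Int × Int)) (p : Int × Int) (start_y pattern_size : Int) :
    (if 0 ≤ p.1 ∧ p.1 < 7 ∧ start_y - pattern_size < p.2 ∧ p.2 ≤ start_y - 1 then
        (pvGridOf l start_y pattern_size).modify (start_y - 1 - p.2).toNat
          (fun r => r.set p.1.toNat '#')
      else pvGridOf l start_y pattern_size)
      = pvGridOf (l ++ [p]) start_y pattern_size := by
  obtain ⟨x, y⟩ := p
  by_cases hc : 0 ≤ x ∧ x < 7 ∧ start_y - pattern_size < y ∧ y ≤ start_y - 1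
  · rw [if_pos hc]
    obtain ⟨hx0, hx7, hy1, hy2⟩ := hc
    apply List.ext_getElem
    · simp [pvGridOf]
    intro i h1 h2
    have hi : i < (pattern_size - 1).toNat := by
      simpa [pvGridOf] using h2
    rw [List.getElem_modify]
    unfold pvGridOf
    rw [List.getElem_map, List.getElem_map, List.getElem_range]
    by_cases hij : (start_y - 1 - y).toNat = i
    · rw [if_pos hij, pvRow_append_set l x y start_y i hx0 hx7 (by omega)]
    · rw [if_neg hij]
      refine (pvRow_append l (x, y) start_y i ?_).symm
      intro x' _ _ heq
      rw [Prod.mk.injEq] at heq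
      exact hij (by omega)
  · rw [if_neg hc]
    unfold pvGridOf
    apply List.map_congr_left
    intro i hi
    have hi' : i < (pattern_size - 1).toNat := List.mem_range.mp hi
    refine (pvRow_append l (x, y) start_y i ?_).symm
    intro x' hx0 hx7 heq
    rw [Prod.mk.injEq] at heq
    refine hc ⟨by omega, by omega, by omega, by omega⟩

-- B's fold over any suffix, starting from the grid of a prefix
lemma pvFold (l2 l1 : List (Int × Int)) (start_y pattern_size : Int) :
    l2.foldl
      (fun g p =>
        if 0 ≤ p.1 ∧ p.1 < 7 ∧ start_y - pattern_size < p.2 ∧ p.2 ≤ start_y - 1 then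
          g.modify (start_y - 1 - p.2).toNat (fun r => r.set p.1.toNat '#')
        else g)
      (pvGridOf l1 start_y pattern_size)
      = pvGridOf (l1 ++ l2) start_y pattern_size := by
  induction l2 generalizing l1 with
  | nil => simp
  | cons p t ih =>
    simp only [List.foldl_cons]
    rw [show (if 0 ≤ p.1 ∧ p.1 < 7 ∧ start_y - pattern_size < p.2 ∧ p.2 ≤ start_y - 1 then
          (pvGridOf l1 start_y pattern_size).modify (start_y - 1 - p.2).toNat
            (fun r => r.set p.1.toNat '#')
        else pvGridOf l1 start_y pattern_size)
        = pvGridOf (l1 ++ [p]) start_y pattern_size from pvStep l1 p start_y pattern_size]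
    rw [ih (l1 ++ [p])]
    simp

-- A's nested folds produce exactly the flattened membership grid
lemma pvA_chars (filled : List (Int × Int)) (start_y pattern_size : Int) :
    (PySem.List.pyRange (start_y - 1) (start_y - pattern_size) (-1)).foldl
      (fun stringy y =>
        stringy ++
          (PySem.List.pyRange 0 7 1).foldl
            (fun row x => row ++ (if (x, y) ∈ filled then ['#'] else [' '])) [])
      []
      = (pvGridOf filled start_y pattern_size).flatten := by
  rw [PySem.List.foldl_append_eq_flatMap
    (fun y => (PySem.List.pyRange 0 7 1).foldl
      (fun row x => row ++ (if (x, y) ∈ filled then ['#'] else [' '])) [])]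
  rw [List.nil_append]
  rw [PySem.List.pyRange_neg_one]
  rw [List.flatMap_map]
  unfold pvGridOf
  rw [List.flatten_eq_flatMap, List.flatMap_map]
  have hn : (start_y - 1 - (start_y - pattern_size)).toNat = (pattern_size - 1).toNat := by
    omega
  rw [hn]
  apply List.flatMap_congr
  intro i _
  rw [PySem.List.foldl_append_eq_flatMap (fun x => if (x, start_y - 1 - (i : Int)) ∈ filled then ['#'] else [' '])]
  rw [List.nil_append]
  unfold pvRow
  rw [show (fun x => if (x, start_y - 1 - (i : Int)) ∈ filled then ['#'] else [' '])
        = (fun x => [if (x, start_y - 1 - (i : Int)) ∈ filled then '#' else ' '])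
      from funext fun x => by split <;> rfl]
  exact pvFlatMap_singleton_map _ _

-- ===== VERDICT (by name: the statement is the Claim_ definition above) =====
theorem print_map_spec : Claim_equal_print_map := by
  intro filled start_y pattern_size _
  unfold Spec_print_map print_map print_map_alt
  rw [pvA_chars, ← pvGridOf_nil start_y pattern_size]
  have := pvFold filled [] start_y pattern_size
  simp only [List.nil_append] at this
  rw [this]
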